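-- pv_equiv track=rewrite | github.com/jansssss/btc-report | app/reporting.py | _score_bar
-- ===== SOURCE A (Python) =====
-- def _score_bar(score: int) -> str:
--     """Generate a colored emoji progress bar for the score (-6 to +6)."""
--     MIN_S, MAX_S, RISK_T, BULL_T = -6, 6, -3, 3
--     clamped = max(MIN_S, min(MAX_S, score))
--
--     cells = []
--     for s in range(MIN_S, MAX_S + 1):
--         if s == clamped:
--             cells.append("🔵")
--         elif s < RISK_T:
--             cells.append("🟥")
--         elif s >= BULL_T:
--             cells.append("🟩")
--         else:
--             cells.append("🟨")
--
--     return "".join(cells) + "\n🔴 리스크오프(-3) │ 중립(0) │ 강세(+3) 🟢"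
-- ===== SOURCE B (Python) =====
-- def _score_bar(score: int) -> str:
--     """Generate a colored emoji progress bar for the score (-6 to +6)."""
--     MIN_S, MAX_S = -6, 6
--     clamped = max(MIN_S, min(MAX_S, score))
--     base = list("🟥" * 3 + "🟨" * 6 + "🟩" * 4)
--     base[clamped - MIN_S] = "🔵"
--     return "".join(base) + "\n🔴 리스크오프(-3) │ 중립(0) │ 강세(+3) 🟢"
-- ===== Notes on version B (the rewrite author's own statement) =====
-- stated objective: simpler
-- what changed: Replaces the per-cell branching loop over range(-6,7) with direct construction of the fixed colored base bar as three repeated blocks plus a single pointwise overwrite of the blue cell at index clamped+6.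
import Mathlib
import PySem

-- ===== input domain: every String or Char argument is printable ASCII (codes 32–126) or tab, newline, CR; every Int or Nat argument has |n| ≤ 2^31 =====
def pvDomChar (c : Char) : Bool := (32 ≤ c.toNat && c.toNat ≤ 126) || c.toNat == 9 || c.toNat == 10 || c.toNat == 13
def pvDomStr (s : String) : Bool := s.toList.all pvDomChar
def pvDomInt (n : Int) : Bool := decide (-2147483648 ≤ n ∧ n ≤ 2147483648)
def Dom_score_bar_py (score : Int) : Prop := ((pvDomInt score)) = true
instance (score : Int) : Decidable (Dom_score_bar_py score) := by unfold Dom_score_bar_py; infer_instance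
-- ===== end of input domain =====

-- ===== PORT A =====
-- B builds the fixed base bar as three blocks and patches the blue cell; simpler decomposition, same value.
def score_bar_py (score : Int) : String :=
  let clamped : Int := max (-6) (min 6 score)
  let cells : List String := (PySem.List.pyRange (-6) 7 1).foldl (fun acc s =>
    acc ++ [if s = clamped then "🔵" else if s < -3 then "🟥" else if s ≥ 3 then "🟩" else "🟨"]) []
  String.join cells ++ "\n🔴 리스크오프(-3) │ 중립(0) │ 강세(+3) 🟢"

-- ===== PORT B =====
def score_bar_py_alt (score : Int) : String :=
  let clamped : Int := max (-6) (min 6 score)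
  let base : List Char := ("🟥🟥🟥" ++ "🟨🟨🟨🟨🟨🟨" ++ "🟩🟩🟩🟩").toList
  let patched := base.set (clamped - (-6)).toNat '🔵'
  String.mk patched ++ "\n🔴 리스크오프(-3) │ 중립(0) │ 강세(+3) 🟢"

-- ===== PRECONDITION & SPEC =====
def Spec_score_bar_py (score : Int) (out : String) : Prop := out = score_bar_py_alt score
instance (score : Int) (out : String) : Decidable (Spec_score_bar_py score out) := by unfold Spec_score_bar_py; infer_instance

-- ===== CLAIM (what is proved, stated in full; the proofs are below) =====
def Claim_equal_score_bar_py : Prop := ∀ (score : Int), Dom_score_bar_py score → Spec_score_bar_py score (score_bar_py score)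

-- ===== LEMMAS AND PROOFS =====

lemma score_bar_key (c : Int) (h1 : -6 ≤ c) (h2 : c ≤ 6) (score : Int)
    (hc : max (-6) (min 6 score) = c) :
    score_bar_py score = score_bar_py_alt score := by
  unfold score_bar_py score_bar_py_alt
  rw [hc]
  interval_cases c <;> decide

-- ===== VERDICT (by name: the statement is the Claim_ definition above) =====
theorem score_bar_py_spec : Claim_equal_score_bar_py := by
  intro score _
  unfold Spec_score_bar_py
  exact score_bar_key (max (-6) (min 6 score)) (le_max_left _ _) (by omega) score rfl
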